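-- pv_equiv track=rewrite | github.com/GPM567/Not-Lonely-Game | customUtils.py | getLettersNum
-- ===== SOURCE A (Python) =====
-- from string import ascii_letters, digits, punctuation
--
-- letters1Byte = ascii_letters + digits + punctuation + " "
--
-- def getLettersNum(text: str):
--     letterN = 0
--     for letter in text:
--         if letter in letters1Byte:
--             letterN += 1
--         else:
--             letterN += 2
--     return letterN
-- ===== SOURCE B (Python) =====
-- from string import ascii_letters, digits, punctuation
--
-- letters1Byte = ascii_letters + digits + punctuation + " "
--
-- def getLettersNum(text: str):
--     # Inverted traversal: charge 2 bytes to every char up front, then scan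
--     # the (duplicate-free) 1-byte alphabet and subtract one byte per
--     # occurrence of each alphabet char in the text, via str.count.
--     narrow = 0
--     for ch in letters1Byte:
--         narrow += text.count(ch)
--     return 2 * len(text) - narrow
-- ===== Notes on version B (the rewrite author's own statement) =====
-- stated objective: alternative
-- what changed: Inverts the traversal: instead of scanning the text and adding 1 or 2 per character, B charges 2 bytes per character up front (2*len) and then loops over the fixed alphabet letters1Byte, subtracting text.count(ch) for each alphabet character; correct because the alphabet is duplicate-free.
import Mathlib
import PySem

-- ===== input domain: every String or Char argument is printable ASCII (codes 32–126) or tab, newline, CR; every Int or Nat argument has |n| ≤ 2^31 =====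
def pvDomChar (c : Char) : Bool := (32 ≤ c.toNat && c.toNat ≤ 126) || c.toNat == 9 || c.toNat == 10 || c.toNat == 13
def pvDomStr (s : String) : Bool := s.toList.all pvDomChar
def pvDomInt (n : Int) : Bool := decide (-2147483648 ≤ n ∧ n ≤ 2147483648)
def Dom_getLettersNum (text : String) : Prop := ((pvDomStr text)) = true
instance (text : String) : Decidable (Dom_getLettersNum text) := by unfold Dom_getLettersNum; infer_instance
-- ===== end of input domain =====

-- B inverts the traversal: 2*len(text) minus, per alphabet character, its count in the
-- text (alternative decomposition; A scans the text adding 1 or 2 per character).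


-- shared module constant letters1Byte = ascii_letters + digits + punctuation + " "
def letters1Byte : String :=
  "abcdefghijklmnopqrstuvwxyzABCDEFGHIJKLMNOPQRSTUVWXYZ0123456789!\"#$%&'()*+,-./:;<=>?@[\\]^_`{|}~ "

-- ===== PORT A =====
-- 'letter in letters1Byte' (single-char substring test) → PySem.Chars.isIn [c] …
def getLettersNum (text : String) : Int :=
  text.toList.foldl
    (fun letterN letter =>
      if PySem.Chars.isIn [letter] letters1Byte.toList then letterN + 1 else letterN + 2)
    0

-- ===== PORT B =====
-- 'text.count(ch)' → PySem.Chars.count text.toList [ch]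
def getLettersNum_alt (text : String) : Int :=
  2 * (text.toList.length : Int) -
    letters1Byte.toList.foldl
      (fun narrow ch => narrow + (PySem.Chars.count text.toList [ch] : Int)) 0

-- ===== PRECONDITION & SPEC =====
def Spec_getLettersNum (text : String) (out : Int) : Prop := out = getLettersNum_alt text
instance (text : String) (out : Int) : Decidable (Spec_getLettersNum text out) := by unfold Spec_getLettersNum; infer_instance

-- ===== CLAIM (what is proved, stated in full; the proofs are below) =====
def Claim_equal_getLettersNum : Prop := ∀ (text : String), Dom_getLettersNum text → Spec_getLettersNum text (getLettersNum text)

-- ===== LEMMAS AND PROOFS =====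

-- PySem.Chars.count.go on a single-character needle counts that character
theorem go_singleton (c : Char) (l : List Char) (fuel acc : Nat) (h : l.length ≤ fuel) :
    PySem.Chars.count.go [c] fuel l acc = acc + l.count c := by
  induction l generalizing fuel acc with
  | nil => cases fuel <;> simp [PySem.Chars.count.go]
  | cons x t ih =>
    cases fuel with
    | zero => simp at h
    | succ n =>
      simp only [PySem.Chars.count.go]
      by_cases hx : x = c
      · simp [hx, List.isPrefixOf, ih _ _ (by simpa using h)]
        omega
      · have hpf : [c].isPrefixOf (x :: t) = false := by
          simp [List.isPrefixOf]
          exact fun hh => (hx hh.symm).elim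
        simp [hpf, ih _ _ (by simpa using h), hx]

-- Python's s.count(c) for a single character c is the character count
theorem count_singleton (s : List Char) (c : Char) :
    PySem.Chars.count s [c] = s.count c := by
  simp [PySem.Chars.count, go_singleton c s s.length 0 le_rfl]

-- 'c in s' for a single character c is list membership
theorem isIn_singleton (c : Char) (l : List Char) :
    PySem.Chars.isIn [c] l = true ↔ c ∈ l := by
  rw [PySem.Chars.isIn_iff_infix]
  constructor
  · intro h; exact h.subset (List.mem_singleton_self c)
  · intro h
    obtain ⟨a, b, rfl⟩ := List.append_of_mem h
    exact ⟨a, b, by simp⟩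

-- an accumulating sum-of-counts fold is the sum of the mapped counts
theorem foldl_add_count (L : List Char) (s : List Char) (a : Int) :
    L.foldl (fun narrow ch => narrow + (PySem.Chars.count s [ch] : Int)) a
      = a + ((L.map fun ch => (s.count ch : Int)).sum) := by
  induction L generalizing a with
  | nil => simp
  | cons c t ih =>
    simp only [List.foldl_cons]
    rw [ih, count_singleton, List.map_cons, List.sum_cons]; ring

-- membership in x :: t splits into count of x plus membership in t, when x ∉ t
theorem countP_mem_cons (x : Char) (t : List Char) (hx : x ∉ t) (s : List Char) :
    s.countP (fun y => decide (y ∈ x :: t)) = s.count x + s.countP (fun y => decide (y ∈ t)) := by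
  induction s with
  | nil => simp
  | cons z zs ihs =>
    rw [List.countP_cons, List.countP_cons, List.count_cons, ihs]
    by_cases hz : z = x
    · simp [hz, hx]
      omega
    · simp [List.mem_cons, hz]
      omega

-- summing per-character counts over a duplicate-free alphabet counts membership
theorem sum_counts_nodup (L : List Char) (hL : L.Nodup) (s : List Char) :
    ((L.map fun ch => (s.count ch : Int)).sum)
      = (s.countP (fun y => decide (y ∈ L)) : Int) := by
  induction L with
  | nil => simp
  | cons x t ih =>
    obtain ⟨hx, ht⟩ := List.nodup_cons.mp hL
    rw [List.map_cons, List.sum_cons, ih ht, countP_mem_cons x t hx s]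
    push_cast; ring

-- A's fold is length plus the number of characters outside letters1Byte
theorem getLettersNum_foldl (l : List Char) (a : Int) :
    l.foldl
      (fun letterN letter =>
        if PySem.Chars.isIn [letter] letters1Byte.toList then letterN + 1 else letterN + 2)
      a
    = a + (l.length : Int)
        + (l.countP (fun c => !(PySem.Chars.isIn [c] letters1Byte.toList)) : Int) := by
  induction l generalizing a with
  | nil => simp
  | cons c t ih =>
    simp only [List.foldl_cons, List.countP_cons, ih]
    by_cases h : PySem.Chars.isIn [c] letters1Byte.toList = true
    · simp [h]; ring
    · simp [h]; ring

theorem letters1Byte_nodup : letters1Byte.toList.Nodup := by decide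

-- ===== VERDICT (by name: the statement is the Claim_ definition above) =====
theorem getLettersNum_spec : Claim_equal_getLettersNum := by
  intro text _
  unfold Spec_getLettersNum getLettersNum getLettersNum_alt
  rw [getLettersNum_foldl, foldl_add_count,
      sum_counts_nodup letters1Byte.toList letters1Byte_nodup text.toList]
  have hcongr : text.toList.countP (fun c => !(PySem.Chars.isIn [c] letters1Byte.toList))
      = text.toList.countP (fun c => !(decide (c ∈ letters1Byte.toList))) := by
    apply List.countP_congr
    intro c _
    by_cases h : c ∈ letters1Byte.toList
    · simp [h, (isIn_singleton c letters1Byte.toList).mpr h]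
    · have hfalse : ¬ (PySem.Chars.isIn [c] letters1Byte.toList = true) :=
        fun ht => h ((isIn_singleton c letters1Byte.toList).mp ht)
      simp [h, hfalse]
  rw [hcongr]
  have hsum : ∀ l : List Char,
      l.countP (fun c => !(decide (c ∈ letters1Byte.toList)))
        + l.countP (fun c => decide (c ∈ letters1Byte.toList)) = l.length := by
    intro l
    induction l with
    | nil => simp
    | cons z zs ih =>
      by_cases hz : z ∈ letters1Byte.toList <;> simp [hz] <;> omega
  have := hsum text.toList
  omega
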